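-- pv_equiv track=rewrite | github.com/safarinexus/uniHelsinki-spring2025-dsa | week-10/onediff.py | count_strings
-- ===== SOURCE A (Python) =====
-- def count_strings(n):
--     count = {}
--     for char in range(26):
--         count[(char, 1)] = 1
--
--     for pos in range(2, n + 1):
--         for char in range(26):
--             ways = 0
--             if char > 0:
--                 ways += count[(char - 1, pos - 1)]
--             if char < 25:
--                 ways += count[(char + 1, pos - 1)]
--             count[(char, pos)] = ways
--
--     total = 0
--     for char in range(26):
--         total += count[(char, n)]
--     return total
-- ===== SOURCE B (Python) =====
-- def count_strings(n):
--     size = 26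
--     def mat_mult(A, B):
--         return [[sum(A[i][k] * B[k][j] for k in range(size)) for j in range(size)] for i in range(size)]
--     def mat_pow(M, p):
--         R = [[1 if i == j else 0 for j in range(size)] for i in range(size)]
--         while p > 0:
--             if p % 2 == 1:
--                 R = mat_mult(R, M)
--             M = mat_mult(M, M)
--             p //= 2
--         return R
--     T = [[1 if abs(i - j) == 1 else 0 for j in range(size)] for i in range(size)]
--     P = mat_pow(T, n - 1)
--     return sum(P[i][j] for i in range(size) for j in range(size))
-- ===== Notes on version B (the rewrite author's own statement) =====
-- stated objective: alternative
-- what changed: Replaced the per-position 26-letter DP sweep with binary matrix exponentiation of the 26x26 adjacent-letter transition matrix, summing all entries of T^(n-1); O(26^3 log n) arithmetic operations instead of O(26 n), though big-integer growth keeps measured wall-clock similar.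
import Mathlib
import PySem

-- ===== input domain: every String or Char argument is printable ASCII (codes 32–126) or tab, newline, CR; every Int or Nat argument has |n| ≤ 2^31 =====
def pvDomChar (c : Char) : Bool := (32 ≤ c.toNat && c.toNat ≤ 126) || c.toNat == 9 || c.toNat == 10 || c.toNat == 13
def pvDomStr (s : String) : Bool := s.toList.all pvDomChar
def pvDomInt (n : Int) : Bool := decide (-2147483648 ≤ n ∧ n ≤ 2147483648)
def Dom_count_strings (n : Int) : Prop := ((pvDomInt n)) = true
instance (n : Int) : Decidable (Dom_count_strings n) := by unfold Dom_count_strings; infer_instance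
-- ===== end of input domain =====

-- B replaces A's per-position 26-letter DP sweep with binary exponentiation of the 26×26
-- adjacent-letter transition matrix (sum of all entries of T^(n-1)): a different algorithm of similar measured cost.


-- ===== PORT A =====
-- A-side helpers: the initial dict, the inner per-char body, and the per-position inner loop.
-- Python's dict is hand-ported as Std.HashMap (exact here: A only inserts fresh (char, pos)
-- tuple keys and looks keys up; PySem.Dict's association list is semantically identical but
-- not evaluable at the sampled sizes). Python's count[(char±1, pos-1)] raises KeyError if the
-- key is absent; under Pre_ (n ≥ 1) the key is always present, so getD with default 0 is exact.
def aInit : Std.HashMap (Int × Int) Int :=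
  (PySem.List.pyRange 0 26 1).foldl (fun d char => d.insert (char, 1) 1)
    Std.HashMap.emptyWithCapacity

def aBody (pos : Int) (d : Std.HashMap (Int × Int) Int) (char : Int) :
    Std.HashMap (Int × Int) Int :=
  let ways : Int := 0
  let ways := if char > 0 then ways + d.getD (char - 1, pos - 1) 0 else ways
  let ways := if char < 25 then ways + d.getD (char + 1, pos - 1) 0 else ways
  d.insert (char, pos) ways

def aPos (d : Std.HashMap (Int × Int) Int) (pos : Int) : Std.HashMap (Int × Int) Int :=
  (PySem.List.pyRange 0 26 1).foldl (aBody pos) d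

def count_strings (n : Int) : Int :=
  let count := aInit
  let count := (PySem.List.pyRange 2 (n + 1) 1).foldl aPos count
  (PySem.List.pyRange 0 26 1).foldl (fun total char => total + count.getD (char, n) 0) 0

-- ===== PORT B =====
-- B-side helpers transliterate Source B's comprehensions as maps over pyRange; all matrix indexing
-- is in range (every matrix built is 26×26), so pyGetD with default is exact.
def matMult (A B : List (List Int)) : List (List Int) :=
  (PySem.List.pyRange 0 26 1).map (fun i =>
    (PySem.List.pyRange 0 26 1).map (fun j =>
      ((PySem.List.pyRange 0 26 1).map (fun k =>
        PySem.List.pyGetD (PySem.List.pyGetD A i []) k 0 *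
        PySem.List.pyGetD (PySem.List.pyGetD B k []) j 0)).sum))

-- the while-loop of mat_pow (p > 0 test; p //= 2 strictly decreases p.toNat)
def powLoop (R M : List (List Int)) (p : Int) : List (List Int) :=
  if p > 0 then
    powLoop (if PySem.Int.mod p 2 = 1 then matMult R M else R) (matMult M M)
      (PySem.Int.floordiv p 2)
  else R
termination_by p.toNat
decreasing_by
  rw [PySem.Int.floordiv_eq_ediv_of_pos (by omega)]
  omega

def matPow (M : List (List Int)) (p : Int) : List (List Int) :=
  let R := (PySem.List.pyRange 0 26 1).map (fun i =>
    (PySem.List.pyRange 0 26 1).map (fun j => if i = j then (1 : Int) else 0))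
  powLoop R M p

def count_strings_alt (n : Int) : Int :=
  let T := (PySem.List.pyRange 0 26 1).map (fun i =>
    (PySem.List.pyRange 0 26 1).map (fun j => if |i - j| = 1 then (1 : Int) else 0))
  let P := matPow T (n - 1)
  ((PySem.List.pyRange 0 26 1).map (fun i =>
    ((PySem.List.pyRange 0 26 1).map (fun j =>
      PySem.List.pyGetD (PySem.List.pyGetD P i []) j 0)).sum)).sum

-- ===== PRECONDITION & SPEC =====
-- Pre_ excludes exactly n ≤ 0, where Python A raises KeyError (count[(char, n)] was never written).
def Pre_count_strings (n : Int) : Prop := 1 ≤ n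
instance (n : Int) : Decidable (Pre_count_strings n) := by unfold Pre_count_strings; infer_instance
def pvWitness_count_strings : Int := 3

def Spec_count_strings (n : Int) (out : Int) : Prop := out = count_strings_alt n
instance (n : Int) (out : Int) : Decidable (Spec_count_strings n out) := by unfold Spec_count_strings; infer_instance

-- ===== CLAIM (what is proved, stated in full; the proofs are below) =====
def Claim_equal_count_strings : Prop := ∀ (n : Int), Dom_count_strings n → Pre_count_strings n → Spec_count_strings n (count_strings n)

-- ===== LEMMAS AND PROOFS =====

-- Proof-side abstractions: the rolling-row reading of A's DP, and the Mathlib matrix of a 26×26 list matrix.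
def rowStep (row : List Int) : List Int :=
  (PySem.List.pyRange 0 26 1).map (fun c =>
    (if c > 0 then PySem.List.pyGetD row (c - 1) 0 else 0) +
    (if c < 25 then PySem.List.pyGetD row (c + 1) 0 else 0))

def Phi (M : List (List Int)) : Matrix (Fin 26) (Fin 26) Int :=
  Matrix.of fun i j => PySem.List.pyGetD (PySem.List.pyGetD M (i : Int) []) (j : Int) 0

def Tm : Matrix (Fin 26) (Fin 26) Int :=
  Matrix.of fun i j => if |(i : Int) - (j : Int)| = 1 then 1 else 0

-- ---- A-side dict lemmas (the DP dict read as the rolling row rowStep) ----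

theorem inner_not_mem (pos : Int) (L : List Int) (c : Int) (hc : c ∉ L)
    (d : Std.HashMap (Int × Int) Int) :
    (L.foldl (aBody pos) d).getD (c, pos) 0 = d.getD (c, pos) 0 := by
  induction L generalizing d with
  | nil => rfl
  | cons x t ih =>
      rw [List.foldl_cons, ih (fun h => hc (List.mem_cons_of_mem _ h))]
      show (d.insert (x, pos) _).getD (c, pos) 0 = _
      have hx : ((x, pos) : Int × Int) ≠ (c, pos) := by
        intro h
        exact hc ((Prod.mk.injEq _ _ _ _ ▸ h).1 ▸ List.mem_cons_self)
      rw [Std.HashMap.getD_insert]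
      simp [hx]

theorem inner_value (pos : Int) (L : List Int) (c : Int) (hc : c ∈ L) (hnd : L.Nodup)
    (d : Std.HashMap (Int × Int) Int) :
    (L.foldl (aBody pos) d).getD (c, pos) 0 =
      (if c > 0 then d.getD (c - 1, pos - 1) 0 else 0) +
      (if c < 25 then d.getD (c + 1, pos - 1) 0 else 0) := by
  have hne : pos - 1 ≠ pos := by omega
  induction L generalizing d with
  | nil => cases hc
  | cons x t ih =>
      rw [List.foldl_cons]
      rcases List.mem_cons.mp hc with h | h
      · subst h
        have hct : c ∉ t := (List.nodup_cons.mp hnd).1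
        rw [inner_not_mem pos t c hct]
        show (d.insert (c, pos) _).getD (c, pos) 0 = _
        rw [Std.HashMap.getD_insert]
        simp only [BEq.rfl, if_pos]
        split_ifs <;> simp
      · rw [ih h (List.nodup_cons.mp hnd).2]
        have pres : ∀ c' : Int, (aBody pos d x).getD (c', pos - 1) 0 = d.getD (c', pos - 1) 0 := by
          intro c'
          show (d.insert (x, pos) _).getD (c', pos - 1) 0 = _
          have hx : ((x, pos) : Int × Int) ≠ (c', pos - 1) := by
            intro h
            exact hne (by simpa using congrArg Prod.snd h.symm)
          rw [Std.HashMap.getD_insert]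
          simp [hx]
        rw [pres, pres]

theorem init_fold_getD (L : List Int) (c : Int) (d : Std.HashMap (Int × Int) Int) :
    (L.foldl (fun d char => d.insert (char, (1 : Int)) 1) d).getD (c, 1) 0 =
      if c ∈ L then 1 else d.getD (c, 1) 0 := by
  induction L generalizing d with
  | nil => simp
  | cons x t ih =>
      rw [List.foldl_cons, ih]
      by_cases hct : c ∈ t
      · simp [hct]
      · rw [if_neg hct, if_congr (List.mem_cons (a := c)) rfl rfl]
        rw [Std.HashMap.getD_insert]
        by_cases hcx : c = x
        · simp [hcx]
        · have hx : ((x, (1 : Int)) : Int × Int) ≠ (c, 1) :=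
            fun h => hcx ((congrArg Prod.fst h).symm)
          simp [hx, hcx, hct]

theorem aInit_getD (c : Int) (h0 : 0 ≤ c) (h26 : c < 26) :
    aInit.getD (c, 1) 0 = 1 := by
  unfold aInit
  rw [init_fold_getD, if_pos (PySem.List.mem_pyRange_one.mpr ⟨h0, h26⟩)]

theorem row_getD_one (c : Int) (h0 : 0 ≤ c) (h26 : c < 26) :
    PySem.List.pyGetD (List.replicate 26 (1 : Int)) c 0 = 1 := by
  obtain ⟨m, rfl⟩ := Int.eq_ofNat_of_zero_le h0
  have hm : m < 26 := by exact_mod_cast h26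
  rw [PySem.List.pyGetD_natCast, List.getD_eq_getElem?_getD, List.getElem?_replicate]
  simp [hm]

theorem rowStep_getD (r : List Int) (c : Int) (h0 : 0 ≤ c) (h26 : c < 26) :
    PySem.List.pyGetD (rowStep r) c 0 =
      (if c > 0 then PySem.List.pyGetD r (c - 1) 0 else 0) +
      (if c < 25 then PySem.List.pyGetD r (c + 1) 0 else 0) := by
  unfold rowStep
  rw [PySem.List.pyGetD_map_pyRange_of_nonneg _ _ _ _ h0 h26]

-- Main invariant: after processing positions 2..(1+k), the dict entry at (c, 1+k)
-- equals entry c of the k-fold iterated row.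
theorem main_inv (k : Nat) (c : Int) (h0 : 0 ≤ c) (h26 : c < 26) :
    ((PySem.List.pyRange 2 (2 + (k : Int)) 1).foldl aPos aInit).getD (c, 1 + (k : Int)) 0
      = PySem.List.pyGetD (rowStep^[k] (List.replicate 26 (1 : Int))) c 0 := by
  induction k generalizing c with
  | zero =>
      rw [PySem.List.pyRange_one_eq_nil (by norm_num)]
      simp only [List.foldl_nil, Nat.cast_zero, add_zero, Function.iterate_zero_apply]
      rw [aInit_getD c h0 h26, row_getD_one c h0 h26]
  | succ k ih =>
      have hsplit : PySem.List.pyRange 2 (2 + ((k + 1 : Nat) : Int)) 1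
          = PySem.List.pyRange 2 (2 + (k : Int)) 1 ++ [2 + (k : Int)] := by
        have h := PySem.List.pyRange_one_succ_right (a := 2) (b := 2 + (k : Int)) (by omega)
        push_cast
        rw [show (2 : Int) + ((k : Int) + 1) = (2 + (k : Int)) + 1 by ring, h]
      rw [hsplit, List.foldl_append]
      simp only [List.foldl_cons, List.foldl_nil]
      have hpos : (1 : Int) + ((k + 1 : Nat) : Int) = 2 + (k : Int) := by push_cast; ring
      rw [hpos]
      show ((PySem.List.pyRange 0 26 1).foldl (aBody (2 + (k : Int))) _).getD (c, 2 + (k : Int)) 0 = _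
      rw [inner_value _ _ c (PySem.List.mem_pyRange_one.mpr ⟨h0, h26⟩) (PySem.List.nodup_pyRange_one 0 26)]
      rw [Function.iterate_succ_apply', rowStep_getD _ c h0 h26]
      have harg : (2 : Int) + (k : Int) - 1 = 1 + (k : Int) := by ring
      rw [harg]
      congr 1
      · split_ifs with h
        · exact ih (c - 1) (by omega) (by omega)
        · rfl
      · split_ifs with h
        · exact ih (c + 1) (by omega) (by omega)
        · rfl

-- ---- sum and indexing glue ----

theorem sum_range_map (f : Nat → Int) (n : Nat) :
    ((List.range n).map f).sum = ∑ i ∈ Finset.range n, f i := by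
  induction n with
  | zero => simp
  | succ n ih => rw [List.range_succ, List.map_append, Finset.sum_range_succ, ← ih]; simp

theorem sum_map_fin (f : Int → Int) :
    ((PySem.List.pyRange 0 26 1).map f).sum = ∑ j : Fin 26, f (j : Int) := by
  rw [PySem.List.pyRange_one, show ((26 : Int) - 0).toNat = 26 from rfl, List.map_map,
    sum_range_map (f ∘ fun k : Nat => (0 : Int) + (k : Int)) 26,
    Fin.sum_univ_eq_sum_range (fun i : Nat => f (i : Int))]
  apply Finset.sum_congr rfl
  intro i _
  simp [Function.comp]

theorem getRow26 {α : Type} (g : Int → α) (d : α) (i : Fin 26) :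
    PySem.List.pyGetD ((PySem.List.pyRange 0 26 1).map g) (i : Int) d = g (i : Int) :=
  PySem.List.pyGetD_map_pyRange_of_nonneg g 26 _ d (Int.natCast_nonneg _) (by exact_mod_cast i.isLt)

theorem Phi_build (g : Int → Int → Int) (i j : Fin 26) :
    Phi ((PySem.List.pyRange 0 26 1).map (fun a =>
      (PySem.List.pyRange 0 26 1).map (fun b => g a b))) i j = g (i : Int) (j : Int) := by
  show PySem.List.pyGetD (PySem.List.pyGetD _ (i : Int) []) (j : Int) 0 = _
  rw [getRow26, getRow26]

theorem Phi_matMult (A B : List (List Int)) : Phi (matMult A B) = Phi A * Phi B := by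
  ext i j
  rw [Matrix.mul_apply]
  show Phi (matMult A B) i j = _
  unfold matMult
  rw [Phi_build (fun a b => ((PySem.List.pyRange 0 26 1).map (fun k =>
        PySem.List.pyGetD (PySem.List.pyGetD A a []) k 0 *
        PySem.List.pyGetD (PySem.List.pyGetD B k []) b 0)).sum)]
  rw [sum_map_fin]
  rfl

theorem Phi_pow (k : Nat) : ∀ (p : Int) (R M : List (List Int)), p.toNat = k → 0 ≤ p →
    Phi (powLoop R M p) = Phi R * Phi M ^ k := by
  induction k using Nat.strong_induction_on with
  | _ k ih =>
    intro p R M hk hp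
    rw [powLoop]
    by_cases hpos : p > 0
    · rw [if_pos hpos]
      have hq : PySem.Int.floordiv p 2 = p / 2 := PySem.Int.floordiv_eq_ediv_of_pos (by omega)
      have hmod : PySem.Int.mod p 2 = p % 2 := PySem.Int.mod_eq_emod_of_pos (by omega)
      have hm : (p / 2).toNat < k := by omega
      have ihm : ∀ R' : List (List Int),
          Phi (powLoop R' (matMult M M) (PySem.Int.floordiv p 2))
            = Phi R' * Phi (matMult M M) ^ (p / 2).toNat := by
        intro R'
        rw [hq]
        exact ih _ hm (p / 2) R' (matMult M M) rfl (by omega)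
      have hX : Phi M * Phi M = Phi M ^ 2 := (sq (Phi M)).symm
      have h2m : (Phi M ^ 2) ^ (p / 2).toNat = Phi M ^ (2 * (p / 2).toNat) := by
        rw [← pow_mul]
      by_cases hodd : PySem.Int.mod p 2 = 1
      · have hk' : k = 2 * (p / 2).toNat + 1 := by rw [hmod] at hodd; omega
        rw [if_pos hodd, ihm, Phi_matMult, Phi_matMult, hX, h2m, hk', pow_succ',
          mul_assoc, ← pow_succ']
      · have hk' : k = 2 * (p / 2).toNat := by rw [hmod] at hodd; omega
        rw [if_neg hodd, ihm, Phi_matMult, hX, h2m, hk']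
    · rw [if_neg hpos]
      have : k = 0 := by omega
      rw [this, pow_zero, mul_one]

-- ---- the transition matrix acting on rows ----

theorem Tm_row (c : Fin 26) (g : Fin 26 → Int) :
    ∑ l, Tm c l * g l
      = (∑ l, if l.val + 1 = c.val then g l else 0)
        + (∑ l, if l.val = c.val + 1 then g l else 0) := by
  rw [← Finset.sum_add_distrib]
  apply Finset.sum_congr rfl
  intro l _
  have h1 : |((c : Int)) - (l : Int)| = 1 ↔ (l.val + 1 = c.val ∨ l.val = c.val + 1) := by
    rw [abs_eq (by norm_num)]
    omega
  show (if |((c : Int)) - (l : Int)| = 1 then (1 : Int) else 0) * g l = _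
  by_cases hp : l.val + 1 = c.val
  · have hq : ¬ l.val = c.val + 1 := by omega
    rw [if_pos (h1.mpr (Or.inl hp)), one_mul, if_pos hp, if_neg hq, add_zero]
  · by_cases hq : l.val = c.val + 1
    · rw [if_pos (h1.mpr (Or.inr hq)), one_mul, if_neg hp, if_pos hq, zero_add]
    · have hno : ¬ |((c : Int)) - (l : Int)| = 1 := fun h' => (h1.mp h').elim hp hq
      rw [if_neg hno, zero_mul, if_neg hp, if_neg hq, add_zero]

theorem sum_pred_sub (c : Fin 26) (g : Fin 26 → Int) :
    (∑ l : Fin 26, if l.val + 1 = c.val then g l else 0)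
      = if _ : 0 < c.val then g ⟨c.val - 1, lt_of_le_of_lt (Nat.sub_le _ _) c.isLt⟩ else 0 := by
  split_ifs with h
  · rw [Finset.sum_eq_single (⟨c.val - 1, lt_of_le_of_lt (Nat.sub_le _ _) c.isLt⟩ : Fin 26)]
    · simp [Nat.sub_add_cancel h]
    · intro b _ hb
      have : ¬ (b.val + 1 = c.val) := fun he => hb (Fin.ext (show b.val = c.val - 1 by omega))
      simp [this]
    · simp
  · apply Finset.sum_eq_zero
    intro l _
    have : ¬ (l.val + 1 = c.val) := by omega
    simp [this]

theorem sum_pred_add (c : Fin 26) (g : Fin 26 → Int) :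
    (∑ l : Fin 26, if l.val = c.val + 1 then g l else 0)
      = if h : c.val + 1 < 26 then g ⟨c.val + 1, h⟩ else 0 := by
  split_ifs with h
  · rw [Finset.sum_eq_single (⟨c.val + 1, h⟩ : Fin 26)]
    · simp
    · intro b _ hb
      have : ¬ (b.val = c.val + 1) := fun he => hb (Fin.ext (by omega))
      simp [this]
    · simp
  · apply Finset.sum_eq_zero
    intro l _
    have hl := l.isLt
    have : ¬ (l.val = c.val + 1) := by omega
    simp [this]

theorem iterate_entry (k : Nat) (c : Fin 26) :
    PySem.List.pyGetD (rowStep^[k] (List.replicate 26 (1 : Int))) (c : Int) 0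
      = ∑ j, (Tm ^ k) c j := by
  induction k generalizing c with
  | zero =>
      rw [Function.iterate_zero_apply,
        row_getD_one _ (Int.natCast_nonneg _) (by exact_mod_cast c.isLt)]
      simp [Matrix.one_apply]
  | succ k ih =>
      rw [Function.iterate_succ_apply',
        rowStep_getD _ (c : Int) (Int.natCast_nonneg _) (by exact_mod_cast c.isLt)]
      have hrhs : ∑ j, (Tm ^ (k + 1)) c j
          = ∑ l, Tm c l * ∑ j, (Tm ^ k) l j := by
        rw [pow_succ']
        simp only [Matrix.mul_apply]
        rw [Finset.sum_comm]
        apply Finset.sum_congr rfl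
        intro l _
        rw [← Finset.mul_sum]
      rw [hrhs, Tm_row, sum_pred_sub, sum_pred_add]
      congr 1
      · by_cases h : 0 < c.val
        · rw [dif_pos h, ← ih, if_pos (show ((c : Fin 26) : Int) > 0 by exact_mod_cast h)]
          congr 1
          show ((c : Fin 26) : Int) - 1 = ((c.val - 1 : Nat) : Int)
          omega
        · rw [dif_neg h, if_neg (show ¬ ((c : Fin 26) : Int) > 0 by
            simp only [gt_iff_lt]
            exact_mod_cast h)]
      · by_cases h : c.val + 1 < 26
        · have hidx : ((c : Fin 26) : Int) + 1 = (((⟨c.val + 1, h⟩ : Fin 26)) : Int) := by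
            show _ = ((c.val + 1 : Nat) : Int)
            omega
          rw [dif_pos h, ← ih, hidx,
            if_pos (show ((c : Fin 26) : Int) < 25 by exact_mod_cast (by omega : c.val < 25))]
        · have h25 : c.val = 25 := by have := c.isLt; omega
          rw [dif_neg h, if_neg (show ¬ ((c : Fin 26) : Int) < 25 by
            exact_mod_cast (by omega : ¬ c.val < 25))]

-- ===== VERDICT (by name: the statement is the Claim_ definition above) =====
theorem count_strings_spec : Claim_equal_count_strings := by
  intro n _ hpre
  have hpre' : (1 : Int) ≤ n := hpre
  show count_strings n = count_strings_alt n
  set k : Nat := (n - 1).toNat with hk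
  have hn1 : n = 1 + (k : Int) := by omega
  have hn2 : n + 1 = 2 + (k : Int) := by omega
  have hPw : Phi (matPow ((PySem.List.pyRange 0 26 1).map (fun i =>
      (PySem.List.pyRange 0 26 1).map (fun j => if |i - j| = 1 then (1 : Int) else 0))) (n - 1))
      = Tm ^ k := by
    unfold matPow
    rw [Phi_pow k (n - 1) _ _ (by omega) (by omega)]
    have hI : Phi ((PySem.List.pyRange 0 26 1).map (fun i =>
        (PySem.List.pyRange 0 26 1).map (fun j => if i = j then (1 : Int) else 0))) = 1 := by
      ext i j
      rw [Phi_build (fun a b => if a = b then (1 : Int) else 0), Matrix.one_apply]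
      by_cases hij : i = j
      · simp [hij]
      · have : ¬ ((i : Int) = (j : Int)) := fun he => hij (Fin.ext (by exact_mod_cast he))
        simp [this, hij]
    have hT : Phi ((PySem.List.pyRange 0 26 1).map (fun i =>
        (PySem.List.pyRange 0 26 1).map (fun j => if |i - j| = 1 then (1 : Int) else 0))) = Tm := by
      ext i j
      rw [Phi_build (fun a b => if |a - b| = 1 then (1 : Int) else 0)]
      rfl
    rw [hI, hT, one_mul]
  have hB : count_strings_alt n = ∑ i : Fin 26, ∑ j : Fin 26, (Tm ^ k) i j := by
    show ((PySem.List.pyRange 0 26 1).map (fun i =>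
        ((PySem.List.pyRange 0 26 1).map (fun j =>
          PySem.List.pyGetD (PySem.List.pyGetD (matPow ((PySem.List.pyRange 0 26 1).map (fun i =>
            (PySem.List.pyRange 0 26 1).map (fun j => if |i - j| = 1 then (1 : Int) else 0))) (n - 1)) i []) j 0)).sum)).sum = _
    rw [sum_map_fin]
    apply Finset.sum_congr rfl
    intro i _
    rw [sum_map_fin]
    apply Finset.sum_congr rfl
    intro j _
    exact congrFun (congrFun hPw i) j
  have hA2 : count_strings n = ∑ i : Fin 26, ∑ j : Fin 26, (Tm ^ k) i j := by
    show (PySem.List.pyRange 0 26 1).foldl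
        (fun total char => total + ((PySem.List.pyRange 2 (n + 1) 1).foldl aPos aInit).getD (char, n) 0) 0
      = _
    rw [PySem.List.foldl_add
      (g := fun c => ((PySem.List.pyRange 2 (n + 1) 1).foldl aPos aInit).getD (c, n) 0)]
    rw [sum_map_fin, zero_add]
    apply Finset.sum_congr rfl
    intro c _
    rw [hn2, hn1, main_inv k (c : Int) (Int.natCast_nonneg _) (by exact_mod_cast c.isLt)]
    exact iterate_entry k c
  rw [hA2, hB]
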